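-- pv_equiv track=rewrite | github.com/stokuj/Exercises | vscode/mooc-programming-26/part06-06_course_grading_part_3/src/course_grading_part_3.py | calc_grade
-- ===== SOURCE A (Python) =====
-- def calc_grade(exercises: dict, exam_points: dict) -> dict:
--     grades_points = {}
--     for student in exercises:
--         number_of_exe = exercises[student]
--         exe_points = number_of_exe // 4
--         total_points = exe_points + exam_points[student]
--
--         grade = 0
--         thresholds = [(28, 5), (24, 4), (21, 3), (18, 2), (15, 1)]
--
--         for limit, val in thresholds:
--             if total_points >= limit:
--                 grade = val
--                 break
--
--         grades_points[student] = [number_of_exe, exe_points, exam_points[student], total_points, grade,]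
--     return grades_points
-- ===== SOURCE B (Python) =====
-- def _row(n, exam):
--     exe = n // 4
--     total = exe + exam
--     grade = sum(total >= b for b in (15, 18, 21, 24, 28))
--     return [n, exe, exam, total, grade]
--
-- def calc_grade(exercises: dict, exam_points: dict) -> dict:
--     return {student: _row(n, exam_points[student]) for student, n in exercises.items()}
-- ===== Notes on version B (the rewrite author's own statement) =====
-- stated objective: idiomatic
-- what changed: The descending thresholds list with a for/break first-match scan is replaced by counting how many ascending boundaries (15,18,21,24,28) the total reaches (sum of comparisons), and the explicit dict-building loop becomes a dict comprehension over a row helper.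
import Mathlib
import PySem

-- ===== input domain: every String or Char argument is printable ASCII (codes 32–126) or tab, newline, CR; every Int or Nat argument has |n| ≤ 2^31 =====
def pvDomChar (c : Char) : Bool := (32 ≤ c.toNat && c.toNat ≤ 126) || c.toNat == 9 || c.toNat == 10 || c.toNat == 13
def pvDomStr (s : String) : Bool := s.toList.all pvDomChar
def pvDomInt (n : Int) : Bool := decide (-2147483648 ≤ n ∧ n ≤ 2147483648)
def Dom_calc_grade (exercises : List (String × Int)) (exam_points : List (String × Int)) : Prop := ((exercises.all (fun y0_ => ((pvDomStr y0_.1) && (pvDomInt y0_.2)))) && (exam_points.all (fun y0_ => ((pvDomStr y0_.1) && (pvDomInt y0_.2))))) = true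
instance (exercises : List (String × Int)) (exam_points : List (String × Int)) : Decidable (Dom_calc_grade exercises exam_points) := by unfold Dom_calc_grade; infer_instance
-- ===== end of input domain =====

-- B replaces A's descending-thresholds for/break scan by counting the ascending boundaries the
-- total reaches (a sum of comparisons) and builds the result dict by a comprehension (objective: idiomatic).

-- ===== PORT A =====
-- the inner 'for limit, val in thresholds: if total >= limit: grade = val; break' (grade starts at 0)
def pvThresholdScan (total_points : Int) : List (Int × Int) → Int
  | [] => 0
  | (limit, val) :: rest => if total_points ≥ limit then val else pvThresholdScan total_points rest

def calc_grade (exercises : List (String × Int)) (exam_points : List (String × Int)) : List (String × List Int) :=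
  -- the Python parameters are dicts; the assoc-list arguments are read into dicts first (exact on duplicates: last value wins)
  let exd := PySem.Dict.ofList exercises
  let epd := PySem.Dict.ofList exam_points
  (exd.items.foldl (fun grades_points p =>
      let number_of_exe := p.2
      let exe_points := PySem.Int.floordiv number_of_exe 4
      let total_points := exe_points + epd.getD p.1 0   -- exam_points[student]; KeyError excluded by Pre_
      let grade := pvThresholdScan total_points [(28, 5), (24, 4), (21, 3), (18, 2), (15, 1)]
      grades_points.insert p.1 [number_of_exe, exe_points, epd.getD p.1 0, total_points, grade])
    PySem.Dict.empty).items

-- ===== PORT B =====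
def pvRowB (n : Int) (exam : Int) : List Int :=
  let exe := PySem.Int.floordiv n 4
  let total := exe + exam
  let grade := (([15, 18, 21, 24, 28] : List Int).map (fun b => if total ≥ b then (1 : Int) else 0)).sum
  [n, exe, exam, total, grade]

def calc_grade_alt (exercises : List (String × Int)) (exam_points : List (String × Int)) : List (String × List Int) :=
  let epd := PySem.Dict.ofList exam_points
  (PySem.Dict.ofList exercises).items.map (fun p => (p.1, pvRowB p.2 (epd.getD p.1 0)))

-- ===== PRECONDITION & SPEC =====
-- Pre_ excludes exactly the inputs where some student of exercises is missing from exam_points, on which A raises KeyError.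
def Pre_calc_grade (exercises : List (String × Int)) (exam_points : List (String × Int)) : Prop :=
  ∀ p ∈ exercises, (PySem.Dict.ofList exam_points).contains p.1 = true
instance (exercises : List (String × Int)) (exam_points : List (String × Int)) : Decidable (Pre_calc_grade exercises exam_points) := by unfold Pre_calc_grade; infer_instance

def pvWitness_calc_grade : (List (String × Int)) × (List (String × Int)) :=
  ([("ada", 10), ("bob", 22)], [("ada", 5), ("bob", 11)])

def Spec_calc_grade (exercises : List (String × Int)) (exam_points : List (String × Int)) (out : List (String × List Int)) : Prop := out = calc_grade_alt exercises exam_points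
instance (exercises : List (String × Int)) (exam_points : List (String × Int)) (out : List (String × List Int)) : Decidable (Spec_calc_grade exercises exam_points out) := by unfold Spec_calc_grade; infer_instance

-- ===== CLAIM (what is proved, stated in full; the proofs are below) =====
def Claim_equal_calc_grade : Prop := ∀ (exercises : List (String × Int)) (exam_points : List (String × Int)), Dom_calc_grade exercises exam_points → Pre_calc_grade exercises exam_points → Spec_calc_grade exercises exam_points (calc_grade exercises exam_points)

-- ===== LEMMAS AND PROOFS =====
-- the two grading rules agree for every total
lemma grade_scan_eq_count (t : Int) :
    pvThresholdScan t [(28, 5), (24, 4), (21, 3), (18, 2), (15, 1)]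
      = (([15, 18, 21, 24, 28] : List Int).map (fun b => if t ≥ b then (1 : Int) else 0)).sum := by
  simp only [pvThresholdScan, List.map, List.sum_cons, List.sum_nil]
  split_ifs <;> omega

theorem calc_grade_spec : Claim_equal_calc_grade := by
  intro exercises exam_points _ _
  show calc_grade exercises exam_points = calc_grade_alt exercises exam_points
  simp only [calc_grade, calc_grade_alt]
  rw [PySem.Dict.items_foldl_insert_fresh
        (PySem.Dict.ofList exercises).items (fun p => p.1)
        (fun p => [p.2, PySem.Int.floordiv p.2 4, (PySem.Dict.ofList exam_points).getD p.1 0,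
          PySem.Int.floordiv p.2 4 + (PySem.Dict.ofList exam_points).getD p.1 0,
          pvThresholdScan (PySem.Int.floordiv p.2 4 + (PySem.Dict.ofList exam_points).getD p.1 0)
            [(28, 5), (24, 4), (21, 3), (18, 2), (15, 1)]])
        PySem.Dict.empty
        (fun a _ => PySem.Dict.contains_empty _)
        (by simpa [PySem.Dict.keys] using PySem.Dict.nodup_keys_ofList exercises)]
  simp only [PySem.Dict.empty, List.nil_append]
  refine List.map_congr_left (fun p _ => ?_)
  simp [pvRowB, grade_scan_eq_count]
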